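-- pv_equiv track=rewrite | github.com/jinyangl312/msms_io | fasta/entrapment.py | add_modification
-- ===== SOURCE A (Python) =====
-- import itertools
--
-- def add_modification(sequence, src_aa, dest_aa, max=3):
--   result = []
--
--   M_indices = [i for i in range(len(sequence)) if sequence[i] == src_aa]
--   for r in range(len(M_indices) + 1):
--     comb = itertools.combinations(M_indices, r)
--     for indices in comb:
--       if len(indices) > max:
--         continue
--       new_s = "".join([sequence[i] if i not in indices else dest_aa for i in range(len(sequence))])
--       result.append(new_s)
--
--   return result
-- ===== SOURCE B (Python) =====
-- def add_modification(sequence, src_aa, dest_aa, max=3):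
--     # Bounded-depth recursion: only combinations of size <= max are ever built,
--     # and strings are assembled incrementally instead of rescanning the sequence.
--     chars = list(sequence)
--     idxs = [i for i, ch in enumerate(chars) if ch == src_aa]
--
--     def gen(tail, r, cur):
--         # all strings obtained by replacing exactly r of the positions in `tail` in `cur`
--         if r == 0:
--             return ["".join(cur)]
--         if len(tail) < r:
--             return []
--         i = tail[0]
--         replaced = cur.copy()
--         replaced[i] = dest_aa
--         return gen(tail[1:], r - 1, replaced) + gen(tail[1:], r, cur)
--
--     out = []
--     for r in range(0, min(max, len(idxs)) + 1):
--         out += gen(idxs, r, chars)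
--     return out
-- ===== Notes on version B (the rewrite author's own statement) =====
-- stated objective: alternative
-- what changed: Instead of generating all 2^M index combinations with itertools and skipping those larger than max, B recurses over the match positions with the remaining replacement count bounded by max (never materialising oversized combinations) and builds each string by copying and updating a char list instead of rescanning the whole sequence with a membership test per position.
import Mathlib
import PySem

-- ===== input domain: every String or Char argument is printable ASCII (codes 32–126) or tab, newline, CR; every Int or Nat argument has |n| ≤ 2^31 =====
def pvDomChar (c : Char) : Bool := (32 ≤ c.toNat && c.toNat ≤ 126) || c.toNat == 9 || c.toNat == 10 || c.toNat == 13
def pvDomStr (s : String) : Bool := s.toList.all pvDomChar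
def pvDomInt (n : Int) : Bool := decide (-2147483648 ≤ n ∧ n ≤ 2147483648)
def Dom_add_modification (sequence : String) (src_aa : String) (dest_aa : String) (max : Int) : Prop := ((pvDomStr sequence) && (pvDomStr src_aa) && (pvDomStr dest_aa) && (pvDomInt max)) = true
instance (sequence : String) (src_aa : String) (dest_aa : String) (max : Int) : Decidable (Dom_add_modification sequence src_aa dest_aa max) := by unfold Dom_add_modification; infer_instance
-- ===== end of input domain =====

-- B replaces A's generate-all-combinations-and-skip enumeration by a recursion whose
-- replacement budget is bounded by max (oversized combinations are never built) and which
-- assembles each string by updating a copied char list instead of rescanning the sequence.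

-- ===== PORT A =====
-- exact port of itertools.combinations(l, r): tuples in lexicographic order of positions
def pyCombinations : List Int → Nat → List (List Int)
  | _, 0 => [[]]
  | [], _ + 1 => []
  | x :: xs, r + 1 => (pyCombinations xs r).map (fun c => x :: c) ++ pyCombinations xs (r + 1)

def add_modification (sequence : String) (src_aa : String) (dest_aa : String) (max : Int) : List String :=
  -- sequence[i] is a 1-char string compared with src_aa; i is always in range
  let M_indices := (PySem.List.pyRange 0 (PySem.Str.len sequence) 1).filter
    (fun i => (PySem.Str.pyGet? sequence i).map (fun c => [c]) == some src_aa.toList)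
  (PySem.List.pyRange 0 ((M_indices.length : Int) + 1) 1).foldl
    (fun result r =>
      (pyCombinations M_indices r.toNat).foldl
        (fun result indices =>
          if (indices.length : Int) > max then result
          else result ++ [String.ofList (PySem.Chars.join []
            ((PySem.List.pyRange 0 (PySem.Str.len sequence) 1).map
              (fun i => if ¬ (i ∈ indices) then ((PySem.Str.pyGet? sequence i).map (fun c => [c])).getD [] else dest_aa.toList)))])
        result)
    []

-- ===== PORT B =====
-- port of Source B's gen(tail, r, cur); the unreachable [] arm corresponds to tail=[] with r<0,
-- never hit from the call sites (0 ≤ r ≤ len(idxs))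
def altGen (dst : List Char) (tail : List Int) (r : Int) (cur : List (List Char)) : List String :=
  if r = 0 then [String.ofList (PySem.Chars.join [] cur)]
  else if (tail.length : Int) < r then []
  else match tail with
    | [] => []
    | i :: rest => altGen dst rest (r - 1) (cur.set i.toNat dst) ++ altGen dst rest r cur
termination_by tail.length
decreasing_by all_goals simp_all

def add_modification_alt (sequence : String) (src_aa : String) (dest_aa : String) (max : Int) : List String :=
  let chars := sequence.toList.map (fun c => [c])
  let idxs := ((PySem.List.enumerate chars).filter (fun p => p.2 == src_aa.toList)).map (fun p => p.1)
  (PySem.List.pyRange 0 (min max (idxs.length : Int) + 1) 1).foldl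
    (fun out r => out ++ altGen dest_aa.toList idxs r chars) []

-- ===== PRECONDITION & SPEC =====
def Spec_add_modification (sequence : String) (src_aa : String) (dest_aa : String) (max : Int) (out : List String) : Prop := out = add_modification_alt sequence src_aa dest_aa max
instance (sequence : String) (src_aa : String) (dest_aa : String) (max : Int) (out : List String) : Decidable (Spec_add_modification sequence src_aa dest_aa max out) := by unfold Spec_add_modification; infer_instance

-- ===== CLAIM (what is proved, stated in full; the proofs are below) =====
def Claim_equal_add_modification : Prop := ∀ (sequence : String) (src_aa : String) (dest_aa : String) (max : Int), Dom_add_modification sequence src_aa dest_aa max → Spec_add_modification sequence src_aa dest_aa max (add_modification sequence src_aa dest_aa max)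

-- ===== LEMMAS AND PROOFS =====

-- string assembly on the B side, written as a foldl of List.set updates
def pvApply (dst : List Char) (ind : List Int) (cur : List (List Char)) : List (List Char) :=
  ind.foldl (fun ch i => ch.set i.toNat dst) cur

def pvStr (cur : List (List Char)) : String := String.ofList (PySem.Chars.join [] cur)

lemma pyCombinations_nil_of_lt : ∀ (l : List Int) (r : Nat), l.length < r → pyCombinations l r = [] := by
  intro l
  induction l with
  | nil => intro r hr; cases r with
      | zero => simp at hr
      | succ r => simp [pyCombinations]
  | cons x xs ih =>
      intro r hr
      cases r with
      | zero => simp at hr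
      | succ r =>
          simp only [pyCombinations]
          rw [ih r (by simpa using hr), ih (r+1) (by simp at hr ⊢; omega)]
          simp

lemma length_of_mem_pyCombinations : ∀ (l : List Int) (r : Nat) (c : List Int), c ∈ pyCombinations l r → c.length = r := by
  intro l
  induction l with
  | nil => intro r c hc; cases r with
      | zero => simp [pyCombinations] at hc; simp [hc]
      | succ r => simp [pyCombinations] at hc
  | cons x xs ih =>
      intro r c hc
      cases r with
      | zero => simp [pyCombinations] at hc; simp [hc]
      | succ r =>
          simp only [pyCombinations, List.mem_append, List.mem_map] at hc
          rcases hc with ⟨c', hc', rfl⟩ | hc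
          · simp [ih r c' hc']
          · exact ih (r+1) c hc

lemma mem_of_mem_pyCombinations : ∀ (l : List Int) (r : Nat) (c : List Int) (i : Int), c ∈ pyCombinations l r → i ∈ c → i ∈ l := by
  intro l
  induction l with
  | nil => intro r c i hc hi; cases r with
      | zero => simp [pyCombinations] at hc; simp [hc] at hi
      | succ r => simp [pyCombinations] at hc
  | cons x xs ih =>
      intro r c i hc hi
      cases r with
      | zero => simp [pyCombinations] at hc; simp [hc] at hi
      | succ r =>
          simp only [pyCombinations, List.mem_append, List.mem_map] at hc
          rcases hc with ⟨c', hc', rfl⟩ | hc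
          · rcases List.mem_cons.mp hi with rfl | hi
            · simp
            · exact List.mem_cons_of_mem _ (ih r c' i hc' hi)
          · exact List.mem_cons_of_mem _ (ih (r+1) c i hc hi)

lemma altGen_eq (dst : List Char) : ∀ (tail : List Int) (k : Nat) (cur : List (List Char)), k ≤ tail.length →
    altGen dst tail (k : Int) cur = (pyCombinations tail k).map (fun ind => pvStr (pvApply dst ind cur)) := by
  intro tail
  induction tail with
  | nil =>
      intro k cur hk
      have hk0 : k = 0 := Nat.le_zero.mp hk
      subst hk0
      simp [altGen, pyCombinations, pvApply, pvStr]
  | cons i rest ih =>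
      intro k cur hk
      cases k with
      | zero => simp [altGen, pyCombinations, pvApply, pvStr]
      | succ k =>
          rw [altGen]
          have hk' : k ≤ rest.length := by simpa using hk
          have h0 : ¬ (((k+1 : Nat) : Int) = 0) := by push_cast; omega
          have h1 : ¬ ((((i :: rest).length : Nat) : Int) < ((k+1 : Nat) : Int)) := by
            simp only [List.length_cons]; push_cast; omega
          rw [if_neg h0, if_neg h1]
          have hc1 : ((k+1 : Nat) : Int) - 1 = (k : Int) := by push_cast; ring
          rw [hc1, ih k _ (by simpa using hk)]
          by_cases h2 : k + 1 ≤ rest.length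
          · rw [ih (k+1) cur h2]
            simp [pyCombinations, pvApply, pvStr, Function.comp]
          · have hnil : pyCombinations rest (k+1) = [] :=
              pyCombinations_nil_of_lt _ _ (by omega)
            have hgen : altGen dst rest ((k+1 : Nat) : Int) cur = [] := by
              rw [altGen.eq_def, if_neg h0, if_pos (by push_cast; omega)]
            rw [hgen]
            simp [pyCombinations, hnil, pvApply, pvStr, Function.comp]

lemma length_pvApply (dst : List Char) : ∀ (ind : List Int) (cur : List (List Char)), (pvApply dst ind cur).length = cur.length := by
  intro ind
  induction ind with
  | nil => intro cur; rfl
  | cons i ind ih => intro cur; simp [pvApply, List.foldl_cons] at ih ⊢; simp [ih]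

lemma getElem_pvApply (dst : List Char) : ∀ (ind : List Int) (cur : List (List Char)) (j : Nat) (hj : j < cur.length),
    (∀ i ∈ ind, 0 ≤ i) →
    (pvApply dst ind cur)[j]'(by rw [length_pvApply]; exact hj) = if (j : Int) ∈ ind then dst else cur[j] := by
  intro ind
  induction ind with
  | nil => intro cur j hj h; simp [pvApply]
  | cons i ind ih =>
      intro cur j hj h
      have hi0 : 0 ≤ i := h i (by simp)
      have hlen : j < (cur.set i.toNat dst).length := by simpa using hj
      have hrec := ih (cur.set i.toNat dst) j hlen (fun x hx => h x (List.mem_cons_of_mem _ hx))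
      have hstep : pvApply dst (i :: ind) cur = pvApply dst ind (cur.set i.toNat dst) := rfl
      rw [List.getElem_of_eq hstep, hrec]
      by_cases hmem : (j : Int) ∈ ind
      · simp [hmem]
      · rw [if_neg hmem, List.getElem_set]
        by_cases hij : i.toNat = j
        · have hji : (j : Int) = i := by
            rw [← hij]; exact Int.toNat_of_nonneg hi0
          simp [hij, hji]
        · have hji : ¬ ((j : Int) = i) := by
            intro hc
            apply hij
            rw [← hc]
            simp
          simp [hij, hji, hmem]

lemma piece_eq (cs : List Char) (dst : List Char) (ind : List Int) (h : ∀ i ∈ ind, 0 ≤ i) :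
    (PySem.List.pyRange 0 (cs.length : Int) 1).map
      (fun i => if ¬ (i ∈ ind) then ((PySem.Chars.pyGet? cs i).map (fun c => [c])).getD [] else dst)
      = pvApply dst ind (cs.map (fun c => [c])) := by
  apply List.ext_getElem
  · simp [PySem.List.length_pyRange_one, length_pvApply]
  · intro j h1 h2
    have hj : j < cs.length := by
      simpa [PySem.List.length_pyRange_one] using h1
    rw [List.getElem_map, PySem.List.getElem_pyRange_one]
    rw [getElem_pvApply dst ind _ j (by simpa using hj) h]
    have hget : PySem.Chars.pyGet? cs ((j : Nat) : Int) = some cs[j] := by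
      simp [PySem.Chars.pyGet?, hj]
    rw [zero_add, hget]
    by_cases hm : (j : Int) ∈ ind <;> simp [hm]


-- generic helpers for assembling the two flatMap forms
lemma flatMap_congr_mem {α β : Type} {l : List α} {f g : α → List β} (h : ∀ x ∈ l, f x = g x) :
    l.flatMap f = l.flatMap g := by
  simp only [List.flatMap_def]
  rw [List.map_congr_left h]

lemma foldl_skip {α β : Type} (P : α → Prop) [DecidablePred P] (f : α → β) : ∀ (l : List α) (acc : List β),
    l.foldl (fun acc x => if P x then acc else acc ++ [f x]) acc = acc ++ (l.filter (fun x => !decide (P x))).map f := by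
  intro l
  induction l with
  | nil => intro acc; simp
  | cons x xs ih =>
      intro acc
      by_cases hx : P x <;> simp [List.foldl_cons, hx, ih]

lemma filter_len_block (L : List (List Int)) (k : Nat) (max : Int)
    (hlen : ∀ c ∈ L, c.length = k) :
    L.filter (fun ind => !decide ((ind.length : Int) > max)) = if (k : Int) > max then [] else L := by
  by_cases hk : (k : Int) > max
  · rw [if_pos hk, List.filter_eq_nil_iff]
    intro c hc
    simp [hlen c hc, hk]
  · rw [if_neg hk, List.filter_eq_self]
    intro c hc
    simp [hlen c hc, hk]


lemma idxs_eq (cs srcl : List Char) :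
    (List.map (fun p => p.1) (List.filter (fun p => p.2 == srcl) (PySem.List.enumerate (cs.map (fun c => [c])))))
      = (PySem.List.pyRange 0 (cs.length : Int) 1).filter (fun i => (PySem.Chars.pyGet? cs i).map (fun c => [c]) == some srcl) := by
  rw [PySem.List.enumerate_eq_map_pyRange _ ([] : List Char)]
  rw [List.filter_map, List.map_map]
  have hlen : PySem.List.len (cs.map (fun c => [c])) = (cs.length : Int) := by
    simp [PySem.List.len]
  rw [hlen]
  have hid : ((fun p => p.1) ∘ fun j => (j, PySem.List.pyGetD (cs.map fun c => [c]) j [])) = fun j => j := rfl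
  rw [hid, List.map_id']
  apply List.filter_congr
  intro i hi
  obtain ⟨hi0, hi1⟩ := PySem.List.mem_pyRange_one.mp hi
  have hi1' : i < ((cs.map fun c => [c]).length : Int) := by simpa using hi1
  rw [Function.comp_apply, PySem.List.pyGetD_eq_getElem _ _ hi0 hi1']
  simp [PySem.Chars.pyGet?, PySem.List.pyGet?_eq_some_getElem _ hi0 hi1, List.getElem_map]

lemma flatMap_if_trunc (F : Int → List String) (m : Nat) (max : Int) :
    (PySem.List.pyRange 0 ((m : Int) + 1) 1).flatMap (fun r => if r > max then [] else F r)
      = (PySem.List.pyRange 0 (min max (m : Int) + 1) 1).flatMap F := by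
  by_cases hm : (m : Int) ≤ max
  · rw [min_eq_right hm]
    apply flatMap_congr_mem
    intro r hr
    obtain ⟨hr0, hr1⟩ := PySem.List.mem_pyRange_one.mp hr
    rw [if_neg (by omega)]
  · push Not at hm
    by_cases h0 : 0 ≤ max
    · rw [min_eq_left (le_of_lt hm)]
      rw [PySem.List.pyRange_one_append 0 (max + 1) ((m : Int) + 1) (by omega) (by omega)]
      rw [List.flatMap_append]
      have h2 : (PySem.List.pyRange (max + 1) ((m : Int) + 1) 1).flatMap (fun r => if r > max then [] else F r) = [] := by
        rw [List.flatMap_eq_nil_iff]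
        intro r hr
        obtain ⟨hr0, hr1⟩ := PySem.List.mem_pyRange_one.mp hr
        rw [if_pos (by omega)]
      rw [h2, List.append_nil]
      apply flatMap_congr_mem
      intro r hr
      obtain ⟨hr0, hr1⟩ := PySem.List.mem_pyRange_one.mp hr
      rw [if_neg (by omega)]
    · push Not at h0
      rw [min_eq_left (by omega : max ≤ (m : Int))]
      rw [show PySem.List.pyRange 0 (max + 1) 1 = [] from PySem.List.pyRange_one_eq_nil (by omega),
        List.flatMap_nil, List.flatMap_eq_nil_iff]
      intro r hr
      obtain ⟨hr0, hr1⟩ := PySem.List.mem_pyRange_one.mp hr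
      rw [if_pos (by omega)]

theorem add_modification_spec_aux : ∀ (sequence : String) (src_aa : String) (dest_aa : String) (max : Int),
    add_modification sequence src_aa dest_aa max = add_modification_alt sequence src_aa dest_aa max := by
  intro seq src dest max
  unfold add_modification add_modification_alt
  simp only [PySem.Str.len_eq, PySem.Str.pyGet?]
  rw [idxs_eq seq.toList src.toList]
  simp only [foldl_skip, PySem.List.foldl_append_eq_flatMap, List.nil_append]
  set cs := seq.toList with hcs
  set M := (PySem.List.pyRange 0 (cs.length : Int) 1).filter
      (fun i => (PySem.Chars.pyGet? cs i).map (fun c => [c]) == some src.toList) with hMdef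
  have hMmem : ∀ i ∈ M, 0 ≤ i := by
    intro i hi
    rw [hMdef, List.mem_filter] at hi
    exact (PySem.List.mem_pyRange_one.mp hi.1).1
  trans ((PySem.List.pyRange 0 ((M.length : Int) + 1) 1).flatMap
    (fun r => if r > max then []
      else (pyCombinations M r.toNat).map
        (fun ind => pvStr (pvApply dest.toList ind (cs.map (fun c => [c]))))))
  · apply flatMap_congr_mem
    intro r hr
    obtain ⟨hr0, hr1⟩ := PySem.List.mem_pyRange_one.mp hr
    rw [filter_len_block _ r.toNat max (fun c hc => length_of_mem_pyCombinations _ _ _ hc)]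
    rw [Int.toNat_of_nonneg hr0]
    by_cases hcase : r > max
    · rw [if_pos hcase, if_pos hcase, List.map_nil]
    · rw [if_neg hcase, if_neg hcase]
      apply List.map_congr_left
      intro ind hind
      have hpos : ∀ i ∈ ind, 0 ≤ i :=
        fun i hi => hMmem i (mem_of_mem_pyCombinations _ _ _ _ hind hi)
      rw [piece_eq cs dest.toList ind hpos]
      rfl
  · rw [flatMap_if_trunc]
    apply flatMap_congr_mem
    intro r hr
    obtain ⟨hr0, hr1⟩ := PySem.List.mem_pyRange_one.mp hr
    have hk : r.toNat ≤ M.length := by omega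
    have halt := altGen_eq dest.toList M r.toNat (cs.map (fun c => [c])) hk
    rw [Int.toNat_of_nonneg hr0] at halt
    exact halt.symm

-- ===== VERDICT (by name: the statement is the Claim_ definition above) =====
theorem add_modification_spec : Claim_equal_add_modification := by
  intro sequence src_aa dest_aa max _
  unfold Spec_add_modification
  exact add_modification_spec_aux sequence src_aa dest_aa max
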